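-- pv_equiv track=rewrite | github.com/karthikkumarcholleti/Generative-AI-User-Agent-using-Elasticsearch-and-RAG | FHIR_COMBINED/FHIR_LLM_UA/backend/app/api/intelligent_visualization.py | _identify_observation_type
-- ===== SOURCE A (Python) =====
-- from typing import List, Dict, Any, Optional, Tuple
--
-- def _identify_observation_type(display: str, code: str) -> Optional[str]:
--     """Identify observation type from display name and code"""
--     if not display and not code:
--         return None
--
--     # Check for specific observation types
--     if "creatinine" in display or "2160-0" in code or "33914-3" in code:
--         return "creatinine"
--     elif ("hemoglobin" in display and "a1c" not in display and "hba1c" not in display) or "718-7" in code: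
--         return "hemoglobin"
--     elif "a1c" in display or "hba1c" in display or "hemoglobin a1c" in display or "4548-4" in code:
--         return "a1c"
--     elif "heart rate" in display or "pulse" in display or "hr" in display or "8867-4" in code:
--         return "heart rate"
--     elif "glucose" in display or "blood sugar" in display or "2339-0" in code:
--         return "glucose"
--     elif "blood pressure" in display or "systolic" in display or "diastolic" in display or "8480-6" in code or "8462-4" in code:
--         return "blood pressure"
--     elif "temperature" in display or "temp" in display or "8310-5" in code:
--         return "temperature"
--     elif "respiratory rate" in display or "9279-1" in code:
--         return "respiratory rate"
--     elif "oxygen saturation" in display or "spo2" in display or "2708-6" in code: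
--         return "oxygen saturation"
--     elif "bmi" in display or "body mass index" in display or "39156-5" in code:
--         return "bmi"
--     elif "weight" in display or "29463-7" in code:
--         return "weight"
--
--     # Generic: extract main keyword from display
--     if display:
--         # Try to extract meaningful keyword
--         words = display.split()
--         for word in words:
--             if len(word) > 3 and word not in ["observation", "value", "recorded", "date"]:
--                 return word.lower()
--
--     return None
-- ===== SOURCE B (Python) =====
-- # Two-channel rewrite: display and code are classified INDEPENDENTLY into the first
-- # rule index each triggers; the result is the label at the minimum of the two indices
-- # (= the first rule either channel fires), with A's keyword fallback behind it.
-- _LABELS = ["creatinine", "hemoglobin", "a1c", "heart rate", "glucose",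
--            "blood pressure", "temperature", "respiratory rate",
--            "oxygen saturation", "bmi", "weight"]
-- _STOP = ["observation", "value", "recorded", "date"]
--
-- def _first_true(flags):
--     for i, f in enumerate(flags):
--         if f:
--             return i
--     return len(flags)
--
-- def _identify_observation_type(display, code):
--     if not display and not code:
--         return None
--     disp = [
--         "creatinine" in display,
--         "hemoglobin" in display and "a1c" not in display and "hba1c" not in display,
--         "a1c" in display or "hba1c" in display or "hemoglobin a1c" in display,
--         "heart rate" in display or "pulse" in display or "hr" in display,
--         "glucose" in display or "blood sugar" in display,
--         "blood pressure" in display or "systolic" in display or "diastolic" in display,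
--         "temperature" in display or "temp" in display,
--         "respiratory rate" in display,
--         "oxygen saturation" in display or "spo2" in display,
--         "bmi" in display or "body mass index" in display,
--         "weight" in display,
--     ]
--     cod = [
--         "2160-0" in code or "33914-3" in code,
--         "718-7" in code,
--         "4548-4" in code,
--         "8867-4" in code,
--         "2339-0" in code,
--         "8480-6" in code or "8462-4" in code,
--         "8310-5" in code,
--         "9279-1" in code,
--         "2708-6" in code,
--         "39156-5" in code,
--         "29463-7" in code,
--     ]
--     idx = min(_first_true(disp), _first_true(cod))
--     if idx < len(_LABELS):
--         return _LABELS[idx]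
--     if display:
--         return next((w.lower() for w in display.split()
--                      if len(w) > 3 and w not in _STOP), None)
--     return None
-- ===== Notes on version B (the rewrite author's own statement) =====
-- stated objective: alternative
-- what changed: Instead of A's single fused if/elif cascade mixing display and code tests per branch, B classifies the two channels independently: it builds a boolean vector of display matches and one of code matches, takes the first-true index of each, and returns the label at the minimum of the two indices (the first rule either channel fires), keeping the keyword fallback behind it.
import Mathlib
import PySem

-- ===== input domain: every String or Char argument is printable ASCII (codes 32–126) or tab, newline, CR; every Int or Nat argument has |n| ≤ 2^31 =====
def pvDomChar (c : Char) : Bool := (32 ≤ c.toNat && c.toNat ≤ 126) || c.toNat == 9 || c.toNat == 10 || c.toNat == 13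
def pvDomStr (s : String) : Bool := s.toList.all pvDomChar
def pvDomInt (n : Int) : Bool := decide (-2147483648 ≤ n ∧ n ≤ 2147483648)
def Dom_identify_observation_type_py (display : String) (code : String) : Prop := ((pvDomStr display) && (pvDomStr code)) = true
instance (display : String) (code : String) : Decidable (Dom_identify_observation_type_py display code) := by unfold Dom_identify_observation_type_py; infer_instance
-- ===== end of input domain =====

-- B classifies display and code independently into first-match rule indices and merges them
-- with min, instead of A's fused if/elif cascade (alternative decomposition, same cost).

-- ===== PORT A =====
-- A's generic-fallback for-loop with early return
def identifyAFallback : List String → Option String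
  | [] => none
  | w :: ws =>
    if PySem.Str.len w > 3 && !(["observation", "value", "recorded", "date"].contains w) then
      some (PySem.Str.lower w)
    else identifyAFallback ws

def identify_observation_type_py (display : String) (code : String) : Option String :=
  if display == "" && code == "" then none
  else if PySem.Str.isIn "creatinine" display || PySem.Str.isIn "2160-0" code || PySem.Str.isIn "33914-3" code then some "creatinine"
  else if (PySem.Str.isIn "hemoglobin" display && !PySem.Str.isIn "a1c" display && !PySem.Str.isIn "hba1c" display) || PySem.Str.isIn "718-7" code then some "hemoglobin"
  else if PySem.Str.isIn "a1c" display || PySem.Str.isIn "hba1c" display || PySem.Str.isIn "hemoglobin a1c" display || PySem.Str.isIn "4548-4" code then some "a1c"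
  else if PySem.Str.isIn "heart rate" display || PySem.Str.isIn "pulse" display || PySem.Str.isIn "hr" display || PySem.Str.isIn "8867-4" code then some "heart rate"
  else if PySem.Str.isIn "glucose" display || PySem.Str.isIn "blood sugar" display || PySem.Str.isIn "2339-0" code then some "glucose"
  else if PySem.Str.isIn "blood pressure" display || PySem.Str.isIn "systolic" display || PySem.Str.isIn "diastolic" display || PySem.Str.isIn "8480-6" code || PySem.Str.isIn "8462-4" code then some "blood pressure"
  else if PySem.Str.isIn "temperature" display || PySem.Str.isIn "temp" display || PySem.Str.isIn "8310-5" code then some "temperature"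
  else if PySem.Str.isIn "respiratory rate" display || PySem.Str.isIn "9279-1" code then some "respiratory rate"
  else if PySem.Str.isIn "oxygen saturation" display || PySem.Str.isIn "spo2" display || PySem.Str.isIn "2708-6" code then some "oxygen saturation"
  else if PySem.Str.isIn "bmi" display || PySem.Str.isIn "body mass index" display || PySem.Str.isIn "39156-5" code then some "bmi"
  else if PySem.Str.isIn "weight" display || PySem.Str.isIn "29463-7" code then some "weight"
  else if !(display == "") then identifyAFallback (PySem.Str.split₀ display)
  else none

-- ===== PORT B =====
def identifyLabels : List String :=
  ["creatinine", "hemoglobin", "a1c", "heart rate", "glucose",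
   "blood pressure", "temperature", "respiratory rate",
   "oxygen saturation", "bmi", "weight"]

def identifyStop : List String := ["observation", "value", "recorded", "date"]

-- Source B's _first_true: index of the first True flag, or the length if none
def firstTrue : List Bool → Nat
  | [] => 0
  | b :: bs => if b then 0 else firstTrue bs + 1

def identify_observation_type_py_alt (display : String) (code : String) : Option String :=
  if display == "" && code == "" then none
  else
    let disp : List Bool :=
      [ PySem.Str.isIn "creatinine" display,
        PySem.Str.isIn "hemoglobin" display && !PySem.Str.isIn "a1c" display && !PySem.Str.isIn "hba1c" display,
        PySem.Str.isIn "a1c" display || PySem.Str.isIn "hba1c" display || PySem.Str.isIn "hemoglobin a1c" display,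
        PySem.Str.isIn "heart rate" display || PySem.Str.isIn "pulse" display || PySem.Str.isIn "hr" display,
        PySem.Str.isIn "glucose" display || PySem.Str.isIn "blood sugar" display,
        PySem.Str.isIn "blood pressure" display || PySem.Str.isIn "systolic" display || PySem.Str.isIn "diastolic" display,
        PySem.Str.isIn "temperature" display || PySem.Str.isIn "temp" display,
        PySem.Str.isIn "respiratory rate" display,
        PySem.Str.isIn "oxygen saturation" display || PySem.Str.isIn "spo2" display,
        PySem.Str.isIn "bmi" display || PySem.Str.isIn "body mass index" display,
        PySem.Str.isIn "weight" display ]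
    let cod : List Bool :=
      [ PySem.Str.isIn "2160-0" code || PySem.Str.isIn "33914-3" code,
        PySem.Str.isIn "718-7" code,
        PySem.Str.isIn "4548-4" code,
        PySem.Str.isIn "8867-4" code,
        PySem.Str.isIn "2339-0" code,
        PySem.Str.isIn "8480-6" code || PySem.Str.isIn "8462-4" code,
        PySem.Str.isIn "8310-5" code,
        PySem.Str.isIn "9279-1" code,
        PySem.Str.isIn "2708-6" code,
        PySem.Str.isIn "39156-5" code,
        PySem.Str.isIn "29463-7" code ]
    let idx := min (firstTrue disp) (firstTrue cod)
    if idx < identifyLabels.length then identifyLabels[idx]?   -- in-range list indexing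
    else if !(display == "") then
      ((PySem.Str.split₀ display).find?
          (fun w => PySem.Str.len w > 3 && !(identifyStop.contains w))).map PySem.Str.lower
    else none

-- ===== PRECONDITION & SPEC =====
def Spec_identify_observation_type_py (display : String) (code : String) (out : Option String) : Prop := out = identify_observation_type_py_alt display code
instance (display : String) (code : String) (out : Option String) : Decidable (Spec_identify_observation_type_py display code out) := by unfold Spec_identify_observation_type_py; infer_instance

-- ===== CLAIM (what is proved, stated in full; the proofs are below) =====
def Claim_equal_identify_observation_type_py : Prop := ∀ (display : String) (code : String), Dom_identify_observation_type_py display code → Spec_identify_observation_type_py display code (identify_observation_type_py display code)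

-- ===== LEMMAS AND PROOFS =====
-- A's fallback loop is the first matching word, lowered
theorem identifyAFallback_eq_find (ws : List String) :
    identifyAFallback ws =
      (ws.find? (fun w => PySem.Str.len w > 3
          && !((["observation", "value", "recorded", "date"] : List String).contains w))).map
        PySem.Str.lower := by
  induction ws with
  | nil => rfl
  | cons w ws ih =>
    rw [identifyAFallback]
    cases hp : (PySem.Str.len w > 3
        && !((["observation", "value", "recorded", "date"] : List String).contains w)) with
    | false => simp only [hp, Bool.false_eq_true, if_false, List.find?_cons, ih]
    | true => simp only [hp, if_true, List.find?_cons, Option.map_some]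

-- peel one rule off B's min-of-first-true-indices lookup: it is one cascade step
theorem minIdx_step (d c : Bool) (ds cs : List Bool) (l : String) (ls : List String) (t : Option String) :
    (if min (firstTrue (d :: ds)) (firstTrue (c :: cs)) < (l :: ls).length then
        (l :: ls)[min (firstTrue (d :: ds)) (firstTrue (c :: cs))]? else t)
      = if d || c then some l
        else (if min (firstTrue ds) (firstTrue cs) < ls.length then
                ls[min (firstTrue ds) (firstTrue cs)]? else t) := by
  cases d <;> cases c <;>
    simp [firstTrue, Nat.succ_min_succ]

theorem minIdx_base (t : Option String) :
    (if min (firstTrue []) (firstTrue []) < ([] : List String).length then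
        ([] : List String)[min (firstTrue []) (firstTrue [])]? else t) = t := by
  simp [firstTrue]

-- ===== VERDICT (by name: the statement is the Claim_ definition above) =====
theorem identify_observation_type_py_spec : Claim_equal_identify_observation_type_py := by
  intro display code _
  unfold Spec_identify_observation_type_py identify_observation_type_py identify_observation_type_py_alt
  simp only [identifyLabels, identifyStop]
  simp only [minIdx_step, minIdx_base]
  rw [identifyAFallback_eq_find]
  simp only [Bool.or_assoc]
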